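-- pv_equiv track=rewrite | github.com/amauriciogonzalez/MMRAG_Project | final_project.py | count_facts_in_ids
-- ===== SOURCE A (Python) =====
-- def count_facts_in_ids(positive_text_ids, positive_image_ids, negative_text_ids, negative_image_ids, ids):
--     # Initialize counts for each type of fact
--     txt_posFacts_count = 0
--     txt_negFacts_count = 0
--     img_posFacts_count = 0
--     img_negFacts_count = 0
--
--     # Count occurrences of each type of fact in ids
--     for fact_id in ids:
--         if fact_id in positive_text_ids:
--             txt_posFacts_count += 1
--         elif fact_id in positive_image_ids:
--             img_posFacts_count += 1
--         elif fact_id in negative_text_ids: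
--             txt_negFacts_count += 1
--         elif fact_id in negative_image_ids:
--             img_negFacts_count += 1
--
--     return {
--         'txt_posFacts': txt_posFacts_count,
--         'txt_negFacts': txt_negFacts_count,
--         'img_posFacts': img_posFacts_count,
--         'img_negFacts': img_negFacts_count
--     }
-- ===== SOURCE B (Python) =====
-- def count_facts_in_ids(positive_text_ids, positive_image_ids, negative_text_ids, negative_image_ids, ids):
--     # Build one id -> category index in reverse priority order, so that
--     # higher-priority collections overwrite lower ones (first match of A's
--     # elif chain wins for ids present in several collections).
--     index = {}
--     for i in negative_image_ids:
--         index[i] = 'img_negFacts'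
--     for i in negative_text_ids:
--         index[i] = 'txt_negFacts'
--     for i in positive_image_ids:
--         index[i] = 'img_posFacts'
--     for i in positive_text_ids:
--         index[i] = 'txt_posFacts'
--     results = {'txt_posFacts': 0, 'txt_negFacts': 0, 'img_posFacts': 0, 'img_negFacts': 0}
--     for fact_id in ids:
--         cat = index.get(fact_id)
--         if cat is not None:
--             results[cat] += 1
--     return results
-- ===== Notes on version B (the rewrite author's own statement) =====
-- stated objective: faster
-- what changed: Replaces the per-id four-way list-membership elif chain with a precomputed id->category dict built once in reverse priority order, then a single pass of O(1) lookups over ids.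
import Mathlib
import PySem

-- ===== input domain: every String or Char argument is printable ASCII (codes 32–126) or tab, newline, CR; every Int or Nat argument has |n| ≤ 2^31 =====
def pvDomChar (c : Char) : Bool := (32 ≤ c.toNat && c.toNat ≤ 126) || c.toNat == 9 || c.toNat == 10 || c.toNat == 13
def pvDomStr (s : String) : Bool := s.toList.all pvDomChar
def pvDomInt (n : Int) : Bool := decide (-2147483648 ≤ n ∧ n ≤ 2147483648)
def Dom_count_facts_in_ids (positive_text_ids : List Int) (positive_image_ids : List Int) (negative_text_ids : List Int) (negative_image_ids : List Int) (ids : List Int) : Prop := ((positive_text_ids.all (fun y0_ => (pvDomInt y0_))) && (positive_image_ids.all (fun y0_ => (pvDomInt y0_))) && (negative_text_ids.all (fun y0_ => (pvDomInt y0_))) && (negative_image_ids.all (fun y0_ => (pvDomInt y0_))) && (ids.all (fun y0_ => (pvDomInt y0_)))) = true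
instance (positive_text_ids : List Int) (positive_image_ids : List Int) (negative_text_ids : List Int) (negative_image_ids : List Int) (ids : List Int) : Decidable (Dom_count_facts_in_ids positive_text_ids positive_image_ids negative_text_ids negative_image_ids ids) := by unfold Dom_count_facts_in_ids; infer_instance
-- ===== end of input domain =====

-- B replaces A's per-id elif membership chain by a precomputed id→category dict
-- (built in reverse priority order) plus a single counting pass (objective: faster).

-- ===== PORT A =====
-- loop body of A's for-loop (the elif membership chain, four counters in a tuple)
def aStep (positive_text_ids positive_image_ids negative_text_ids negative_image_ids : List Int) (s : Int × Int × Int × Int) (fact_id : Int) : Int × Int × Int × Int :=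
  if positive_text_ids.contains fact_id then (s.1 + 1, s.2.1, s.2.2.1, s.2.2.2)
  else if positive_image_ids.contains fact_id then (s.1, s.2.1, s.2.2.1 + 1, s.2.2.2)
  else if negative_text_ids.contains fact_id then (s.1, s.2.1 + 1, s.2.2.1, s.2.2.2)
  else if negative_image_ids.contains fact_id then (s.1, s.2.1, s.2.2.1, s.2.2.2 + 1)
  else s

def count_facts_in_ids (positive_text_ids : List Int) (positive_image_ids : List Int) (negative_text_ids : List Int) (negative_image_ids : List Int) (ids : List Int) : List (String × Int) :=
  let s := ids.foldl (aStep positive_text_ids positive_image_ids negative_text_ids negative_image_ids) (0, 0, 0, 0)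
  [("txt_posFacts", s.1), ("txt_negFacts", s.2.1), ("img_posFacts", s.2.2.1), ("img_negFacts", s.2.2.2)]

-- ===== PORT B =====
-- B's id -> category index, built in reverse priority order (later inserts overwrite)
def bIndex (positive_text_ids positive_image_ids negative_text_ids negative_image_ids : List Int) : PySem.Dict Int String :=
  positive_text_ids.foldl (fun d i => d.insert i "txt_posFacts")
    (positive_image_ids.foldl (fun d i => d.insert i "img_posFacts")
      (negative_text_ids.foldl (fun d i => d.insert i "txt_negFacts")
        (negative_image_ids.foldl (fun (d : PySem.Dict Int String) i => d.insert i "img_negFacts")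
          PySem.Dict.empty)))

-- loop body of B's counting pass: one .get lookup, increment on hit
def bStep (index : PySem.Dict Int String) (r : PySem.Dict String Int) (fact_id : Int) : PySem.Dict String Int :=
  match index.get? fact_id with
  | some cat => r.modify cat 0 (· + 1)
  | none => r

def count_facts_in_ids_alt (positive_text_ids : List Int) (positive_image_ids : List Int) (negative_text_ids : List Int) (negative_image_ids : List Int) (ids : List Int) : List (String × Int) :=
  let index := bIndex positive_text_ids positive_image_ids negative_text_ids negative_image_ids
  let results0 : PySem.Dict String Int :=
    PySem.Dict.ofList [("txt_posFacts", 0), ("txt_negFacts", 0), ("img_posFacts", 0), ("img_negFacts", 0)]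
  (ids.foldl (bStep index) results0).items

-- ===== PRECONDITION & SPEC =====
def Spec_count_facts_in_ids (positive_text_ids : List Int) (positive_image_ids : List Int) (negative_text_ids : List Int) (negative_image_ids : List Int) (ids : List Int) (out : List (String × Int)) : Prop := out = count_facts_in_ids_alt positive_text_ids positive_image_ids negative_text_ids negative_image_ids ids
instance (positive_text_ids : List Int) (positive_image_ids : List Int) (negative_text_ids : List Int) (negative_image_ids : List Int) (ids : List Int) (out : List (String × Int)) : Decidable (Spec_count_facts_in_ids positive_text_ids positive_image_ids negative_text_ids negative_image_ids ids out) := by unfold Spec_count_facts_in_ids; infer_instance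

-- ===== CLAIM (what is proved, stated in full; the proofs are below) =====
def Claim_equal_count_facts_in_ids : Prop := ∀ (positive_text_ids : List Int) (positive_image_ids : List Int) (negative_text_ids : List Int) (negative_image_ids : List Int) (ids : List Int), Dom_count_facts_in_ids positive_text_ids positive_image_ids negative_text_ids negative_image_ids ids → Spec_count_facts_in_ids positive_text_ids positive_image_ids negative_text_ids negative_image_ids ids (count_facts_in_ids positive_text_ids positive_image_ids negative_text_ids negative_image_ids ids)

-- ===== LEMMAS AND PROOFS =====

-- Lookup in a fold of same-valued inserts.
theorem get?_foldl_insert_const (xs : List Int) (v : String) (d : PySem.Dict Int String) (k : Int) :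
    (xs.foldl (fun d i => d.insert i v) d).get? k
      = if xs.contains k then some v else d.get? k := by
  induction xs generalizing d with
  | nil => simp
  | cons x t ih =>
      simp only [List.foldl_cons, ih, List.contains_cons]
      by_cases hx : k = x
      · subst hx
        by_cases ht : k ∈ t <;> simp [ht, PySem.Dict.get?_insert_self]
      · by_cases ht : k ∈ t <;>
          simp [ht, hx, PySem.Dict.get?_insert_of_ne _ _ hx]

-- The index resolves each id exactly as A's elif chain does.
theorem index_get (pt pi nt ni : List Int) (k : Int) :
    (bIndex pt pi nt ni).get? k
      = if pt.contains k then some "txt_posFacts"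
        else if pi.contains k then some "img_posFacts"
        else if nt.contains k then some "txt_negFacts"
        else if ni.contains k then some "img_negFacts"
        else none := by
  simp only [bIndex, get?_foldl_insert_const, PySem.Dict.get?_empty]

-- B's counting pass over its index mirrors A's counter loop, from any counter values.
theorem count_loop (pt pi nt ni ids : List Int) (a b c d : Int) :
    (ids.foldl (bStep (bIndex pt pi nt ni))
      (PySem.Dict.ofList [("txt_posFacts", a), ("txt_negFacts", b), ("img_posFacts", c), ("img_negFacts", d)])).items
    = (fun s : Int × Int × Int × Int =>
        [("txt_posFacts", s.1), ("txt_negFacts", s.2.1), ("img_posFacts", s.2.2.1), ("img_negFacts", s.2.2.2)])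
      (ids.foldl (aStep pt pi nt ni) (a, b, c, d)) := by
  induction ids generalizing a b c d with
  | nil => rfl
  | cons x t ih =>
      rw [List.foldl_cons, List.foldl_cons]
      by_cases h1 : pt.contains x
      · have hb : bStep (bIndex pt pi nt ni)
            (PySem.Dict.ofList [("txt_posFacts", a), ("txt_negFacts", b), ("img_posFacts", c), ("img_negFacts", d)]) x
            = PySem.Dict.ofList [("txt_posFacts", a + 1), ("txt_negFacts", b), ("img_posFacts", c), ("img_negFacts", d)] := by
          simp only [bStep, index_get, h1, if_true]; rfl
        have ha : aStep pt pi nt ni (a, b, c, d) x = (a + 1, b, c, d) := by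
          simp only [aStep, h1, if_true]
        rw [hb, ha]; exact ih _ _ _ _
      · by_cases h2 : pi.contains x
        · have hb : bStep (bIndex pt pi nt ni)
              (PySem.Dict.ofList [("txt_posFacts", a), ("txt_negFacts", b), ("img_posFacts", c), ("img_negFacts", d)]) x
              = PySem.Dict.ofList [("txt_posFacts", a), ("txt_negFacts", b), ("img_posFacts", c + 1), ("img_negFacts", d)] := by
            simp only [bStep, index_get, h1, h2, if_true, Bool.false_eq_true, if_false]; rfl
          have ha : aStep pt pi nt ni (a, b, c, d) x = (a, b, c + 1, d) := by
            simp only [aStep, h1, h2, if_true, Bool.false_eq_true, if_false]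
          rw [hb, ha]; exact ih _ _ _ _
        · by_cases h3 : nt.contains x
          · have hb : bStep (bIndex pt pi nt ni)
                (PySem.Dict.ofList [("txt_posFacts", a), ("txt_negFacts", b), ("img_posFacts", c), ("img_negFacts", d)]) x
                = PySem.Dict.ofList [("txt_posFacts", a), ("txt_negFacts", b + 1), ("img_posFacts", c), ("img_negFacts", d)] := by
              simp only [bStep, index_get, h1, h2, h3, if_true, Bool.false_eq_true, if_false]; rfl
            have ha : aStep pt pi nt ni (a, b, c, d) x = (a, b + 1, c, d) := by
              simp only [aStep, h1, h2, h3, if_true, Bool.false_eq_true, if_false]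
            rw [hb, ha]; exact ih _ _ _ _
          · by_cases h4 : ni.contains x
            · have hb : bStep (bIndex pt pi nt ni)
                  (PySem.Dict.ofList [("txt_posFacts", a), ("txt_negFacts", b), ("img_posFacts", c), ("img_negFacts", d)]) x
                  = PySem.Dict.ofList [("txt_posFacts", a), ("txt_negFacts", b), ("img_posFacts", c), ("img_negFacts", d + 1)] := by
                simp only [bStep, index_get, h1, h2, h3, h4, if_true, Bool.false_eq_true, if_false]; rfl
              have ha : aStep pt pi nt ni (a, b, c, d) x = (a, b, c, d + 1) := by
                simp only [aStep, h1, h2, h3, h4, if_true, Bool.false_eq_true, if_false]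
              rw [hb, ha]; exact ih _ _ _ _
            · have hb : bStep (bIndex pt pi nt ni)
                  (PySem.Dict.ofList [("txt_posFacts", a), ("txt_negFacts", b), ("img_posFacts", c), ("img_negFacts", d)]) x
                  = PySem.Dict.ofList [("txt_posFacts", a), ("txt_negFacts", b), ("img_posFacts", c), ("img_negFacts", d)] := by
                simp only [bStep, index_get, h1, h2, h3, h4, Bool.false_eq_true, if_false]
              have ha : aStep pt pi nt ni (a, b, c, d) x = (a, b, c, d) := by
                simp only [aStep, h1, h2, h3, h4, Bool.false_eq_true, if_false]
              rw [hb, ha]; exact ih _ _ _ _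

-- ===== VERDICT (by name: the statement is the Claim_ definition above) =====
theorem count_facts_in_ids_spec : Claim_equal_count_facts_in_ids := by
  intro pt pi nt ni ids _
  unfold Spec_count_facts_in_ids count_facts_in_ids count_facts_in_ids_alt
  exact (count_loop pt pi nt ni ids 0 0 0 0).symm
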